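-- pv_equiv track=rewrite | github.com/Jenusdy/scraper-sikumbang-tapera | main.py | calculate_aggregation
-- ===== SOURCE A (Python) =====
-- def calculate_aggregation(bangunan_list):
--
--     jml_subsidi = 0
--     jml_subsidi_terjual = 0
--     jml_komersil = 0
--     jml_komersil_terjual = 0
--
--     for bgn in bangunan_list:
--
--         tipe_bgn = str(
--             bgn.get("tipeBangunan")
--         ).lower()
--
--         status_unit = str(
--             bgn.get("status")
--         ).lower()
--
--         if tipe_bgn == "subsidi":
--
--             jml_subsidi += 1
--
--             if status_unit == "terjual":
--                 jml_subsidi_terjual += 1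
--
--         elif tipe_bgn == "komersil":
--
--             jml_komersil += 1
--
--             if status_unit == "komersil-terjual":
--                 jml_komersil_terjual += 1
--
--     return {
--         "jumlah_unit_subsidi": jml_subsidi,
--         "jumlah_unit_subsidi_terjual": jml_subsidi_terjual,
--         "jumlah_unit_komersil": jml_komersil,
--         "jumlah_unit_komersil_terjual": jml_komersil_terjual
--     }
-- ===== SOURCE B (Python) =====
-- def calculate_aggregation(bangunan_list):
--     # One pass builds a frequency table over (type, status) keys; the totals
--     # are then read off the table instead of being accumulated branch by branch.
--     keys = [
--         (str(bgn.get("tipeBangunan")).lower(), str(bgn.get("status")).lower())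
--         for bgn in bangunan_list
--     ]
--     counts = {}
--     for key in keys:
--         counts[key] = counts.get(key, 0) + 1
--     jml_subsidi = sum(n for (tipe, _status), n in counts.items() if tipe == "subsidi")
--     jml_komersil = sum(n for (tipe, _status), n in counts.items() if tipe == "komersil")
--     return {
--         "jumlah_unit_subsidi": jml_subsidi,
--         "jumlah_unit_subsidi_terjual": counts.get(("subsidi", "terjual"), 0),
--         "jumlah_unit_komersil": jml_komersil,
--         "jumlah_unit_komersil_terjual": counts.get(("komersil", "komersil-terjual"), 0),
--     }
-- ===== Notes on version B (the rewrite author's own statement) =====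
-- stated objective: alternative
-- what changed: Replaces A's branch-driven four-accumulator loop with a frequency table over (type,status) keys built in one pass, from which the two totals are summed and the two 'terjual' counts are read off by direct lookup.
import Mathlib
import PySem

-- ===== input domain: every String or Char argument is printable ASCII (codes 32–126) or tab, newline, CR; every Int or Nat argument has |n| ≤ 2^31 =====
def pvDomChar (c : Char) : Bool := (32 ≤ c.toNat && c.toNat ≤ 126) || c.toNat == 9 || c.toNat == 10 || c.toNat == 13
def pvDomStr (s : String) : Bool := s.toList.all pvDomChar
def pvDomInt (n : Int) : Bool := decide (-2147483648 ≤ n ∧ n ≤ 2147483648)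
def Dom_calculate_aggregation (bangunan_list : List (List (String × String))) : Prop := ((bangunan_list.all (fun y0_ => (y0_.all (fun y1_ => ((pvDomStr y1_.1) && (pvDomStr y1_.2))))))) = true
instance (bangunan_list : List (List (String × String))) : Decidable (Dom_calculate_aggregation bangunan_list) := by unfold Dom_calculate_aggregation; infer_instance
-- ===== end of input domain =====

-- B replaces A's branch-driven four-accumulator loop by a frequency table over
-- (type, status) keys plus a separate aggregation pass (alternative decomposition).

-- ===== PORT A =====
-- shared with port B: str(bgn.get(k)) — None prints as "None"
def pvStrOpt (o : Option String) : String :=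
  match o with | none => "None" | some s => s

def pvGet (bgn : List (String × String)) (k : String) : Option String :=
  (PySem.Dict.ofList bgn).get? k

def calculate_aggregation (bangunan_list : List (List (String × String))) : List (String × Int) :=
  let r := bangunan_list.foldl
    (fun (acc : Int × Int × Int × Int) bgn =>
      let tipe_bgn := PySem.Str.lower (pvStrOpt (pvGet bgn "tipeBangunan"))
      let status_unit := PySem.Str.lower (pvStrOpt (pvGet bgn "status"))
      if tipe_bgn == "subsidi" then
        (acc.1 + 1, (if status_unit == "terjual" then acc.2.1 + 1 else acc.2.1), acc.2.2.1, acc.2.2.2)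
      else if tipe_bgn == "komersil" then
        (acc.1, acc.2.1, acc.2.2.1 + 1, (if status_unit == "komersil-terjual" then acc.2.2.2 + 1 else acc.2.2.2))
      else acc)
    (0, 0, 0, 0)
  [("jumlah_unit_subsidi", r.1), ("jumlah_unit_subsidi_terjual", r.2.1),
   ("jumlah_unit_komersil", r.2.2.1), ("jumlah_unit_komersil_terjual", r.2.2.2)]

-- ===== PORT B =====
def pvKey (bgn : List (String × String)) : String × String :=
  (PySem.Str.lower (pvStrOpt (pvGet bgn "tipeBangunan")),
   PySem.Str.lower (pvStrOpt (pvGet bgn "status")))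

def calculate_aggregation_alt (bangunan_list : List (List (String × String))) : List (String × Int) :=
  let keys := bangunan_list.map pvKey
  let counts := keys.foldl (fun d k => d.insert k (d.getD k 0 + 1))
    (PySem.Dict.empty : PySem.Dict (String × String) Int)
  let jml_subsidi := ((counts.items.filter (fun p => p.1.1 == "subsidi")).map (·.2)).sum
  let jml_komersil := ((counts.items.filter (fun p => p.1.1 == "komersil")).map (·.2)).sum
  [("jumlah_unit_subsidi", jml_subsidi),
   ("jumlah_unit_subsidi_terjual", counts.getD ("subsidi", "terjual") 0),
   ("jumlah_unit_komersil", jml_komersil),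
   ("jumlah_unit_komersil_terjual", counts.getD ("komersil", "komersil-terjual") 0)]

-- ===== PRECONDITION & SPEC =====
def Spec_calculate_aggregation (bangunan_list : List (List (String × String))) (out : List (String × Int)) : Prop := out = calculate_aggregation_alt bangunan_list
instance (bangunan_list : List (List (String × String))) (out : List (String × Int)) : Decidable (Spec_calculate_aggregation bangunan_list out) := by unfold Spec_calculate_aggregation; infer_instance

-- ===== CLAIM (what is proved, stated in full; the proofs are below) =====
def Claim_equal_calculate_aggregation : Prop := ∀ (bangunan_list : List (List (String × String))), Dom_calculate_aggregation bangunan_list → Spec_calculate_aggregation bangunan_list (calculate_aggregation bangunan_list)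

-- ===== LEMMAS AND PROOFS =====

-- A's loop computes counts over the key list
lemma loopA_eq (l : List (List (String × String))) (s st k kt : Int) :
    l.foldl
      (fun (acc : Int × Int × Int × Int) bgn =>
        let tipe_bgn := PySem.Str.lower (pvStrOpt (pvGet bgn "tipeBangunan"))
        let status_unit := PySem.Str.lower (pvStrOpt (pvGet bgn "status"))
        if tipe_bgn == "subsidi" then
          (acc.1 + 1, (if status_unit == "terjual" then acc.2.1 + 1 else acc.2.1), acc.2.2.1, acc.2.2.2)
        else if tipe_bgn == "komersil" then
          (acc.1, acc.2.1, acc.2.2.1 + 1, (if status_unit == "komersil-terjual" then acc.2.2.2 + 1 else acc.2.2.2))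
        else acc)
      (s, st, k, kt)
    = (s + ((l.map pvKey).countP (fun p => p.1 == "subsidi") : Int),
       st + ((l.map pvKey).count ("subsidi", "terjual") : Int),
       k + ((l.map pvKey).countP (fun p => p.1 == "komersil") : Int),
       kt + ((l.map pvKey).count ("komersil", "komersil-terjual") : Int)) := by
  induction l generalizing s st k kt with
  | nil => simp
  | cons b t ih =>
    simp only [List.foldl_cons, List.map_cons, List.countP_cons, List.count_cons]
    rw [ih]
    simp only [pvKey, List.count]
    by_cases h1 : PySem.Str.lower (pvStrOpt (pvGet b "tipeBangunan")) = "subsidi" <;>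
      by_cases h2 : PySem.Str.lower (pvStrOpt (pvGet b "status")) = "terjual" <;>
        by_cases h3 : PySem.Str.lower (pvStrOpt (pvGet b "tipeBangunan")) = "komersil" <;>
          by_cases h4 : PySem.Str.lower (pvStrOpt (pvGet b "status")) = "komersil-terjual" <;>
            simp_all [Prod.ext_iff] <;> omega

lemma sum_int_map (S : List (String × String)) (c : String × String → Nat) :
    (S.map (fun x => (c x : Int))).sum = ((S.map c).sum : Int) := by
  induction S with
  | nil => simp
  | cons a t ih => simp [ih]

lemma sum_count_dedup_filter (p : String × String → Bool) (l : List (String × String)) :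
    ((l.dedup.filter p).map fun x => l.count x).sum = l.countP p := by
  have h := List.sum_map_count_dedup_filter_eq_countP p l
  simp only [List.count_eq_countP, beq_eq_decide] at h ⊢
  exact h

-- summing the counter over distinct keys with first component q equals countP
lemma sum_counter_filter (keys : List (String × String)) (q : String) :
    ((((PySem.Dict.counter keys).items.filter (fun p => p.1.1 == q)).map (·.2)).sum)
      = (keys.countP (fun p => p.1 == q) : Int) := by
  rw [PySem.Dict.items_counter]
  rw [List.filter_map, List.map_map]
  have hperm : List.Perm ((PySem.Set.ofList keys).filter (fun p => p.1 == q))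
      (keys.dedup.filter (fun p => p.1 == q)) := by
    rw [List.perm_ext_iff_of_nodup (List.Nodup.filter _ (PySem.Set.nodup_ofList keys))
      (List.Nodup.filter _ keys.nodup_dedup)]
    intro a
    simp [List.mem_filter, PySem.Set.mem_ofList, List.mem_dedup]
  calc (((PySem.Set.ofList keys).filter (fun p => p.1 == q)).map
          ((fun p => p.2) ∘ (fun k => (k, (keys.count k : Int))))).sum
      = (((PySem.Set.ofList keys).filter (fun p => p.1 == q)).map
          (fun k => (keys.count k : Int))).sum := by rfl
    _ = ((keys.dedup.filter (fun p => p.1 == q)).map (fun k => (keys.count k : Int))).sum :=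
          (hperm.map _).sum_eq
    _ = (((keys.dedup.filter (fun p => p.1 == q)).map (fun k => keys.count k)).sum : Int) :=
          sum_int_map _ _
    _ = (keys.countP (fun p => p.1 == q) : Int) := by
          rw [sum_count_dedup_filter]

-- ===== VERDICT (by name: the statement is the Claim_ definition above) =====
theorem calculate_aggregation_spec : Claim_equal_calculate_aggregation := by
  intro l _
  unfold Spec_calculate_aggregation calculate_aggregation calculate_aggregation_alt
  simp only []
  rw [loopA_eq]
  rw [show (fun (d : PySem.Dict (String × String) Int) k => d.insert k (d.getD k 0 + 1)) =
        (fun d k => d.insert k (d.getD k 0 + 1)) from rfl]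
  rw [PySem.Dict.foldl_insert_getD_add_one_eq_counter]
  simp only [PySem.Dict.getD_counter, sum_counter_filter, List.countP_map]
  simp
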